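-- pv_equiv track=rewrite | github.com/bakachanbaby/code_ptit | doi_cho_cac_chu_so.py | prevNum
-- ===== SOURCE A (Python) =====
-- def prevNum(s, n):
-- 	vt = -1
--
-- 	for i in range(n - 2, -1, -1):
-- 		if int(s[i]) > int(s[i + 1]):
-- 			vt = i
-- 			break
--
-- 	tmp = -1
-- 	for i in range(n - 1, vt, -1):
-- 	    if (tmp == -1 and ord(s[i]) < ord(s[vt])):
-- 		    tmp = i
-- 	    elif (vt > -1 and ord(s[i]) >= ord(s[tmp]) and ord(s[i]) < ord(s[vt])):
-- 		    tmp = i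
--
-- 	if vt == -1:
-- 		return "" . join("-1")
-- 	else:
-- 	    (s[vt], s[tmp]) = (s[tmp], s[vt])
-- 	return "" . join(s)
-- ===== SOURCE B (Python) =====
-- def prevNum(s, n):
--     orig = "".join(s)
--     cands = []
--     for i in range(n):
--         for j in range(i + 1, n):
--             t = s[:]
--             t[i], t[j] = t[j], t[i]
--             c = "".join(t)
--             if c < orig:
--                 cands.append(c)
--     if not cands:
--         return "-1"
--     return max(cands)
-- ===== Notes on version B (the rewrite author's own statement) =====
-- stated objective: alternative
-- what changed: A's greedy construction (rightmost-descent pivot plus best-smaller-digit swap found by two backward scans) is replaced by an exhaustive search that enumerates every single swap of two of the first n elements and returns the maximum joined string that is smaller than the original.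
-- outside the precondition, e.g. on prevNum(['', '9', '0', '2'], 4): A returns '209', B returns '290'; on prevNum(['2', '1', 'x'], 2): A returns '12x', B returns '12x'; on prevNum(['1', '2'], 3): A raises IndexError, B raises IndexError
import Mathlib
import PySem

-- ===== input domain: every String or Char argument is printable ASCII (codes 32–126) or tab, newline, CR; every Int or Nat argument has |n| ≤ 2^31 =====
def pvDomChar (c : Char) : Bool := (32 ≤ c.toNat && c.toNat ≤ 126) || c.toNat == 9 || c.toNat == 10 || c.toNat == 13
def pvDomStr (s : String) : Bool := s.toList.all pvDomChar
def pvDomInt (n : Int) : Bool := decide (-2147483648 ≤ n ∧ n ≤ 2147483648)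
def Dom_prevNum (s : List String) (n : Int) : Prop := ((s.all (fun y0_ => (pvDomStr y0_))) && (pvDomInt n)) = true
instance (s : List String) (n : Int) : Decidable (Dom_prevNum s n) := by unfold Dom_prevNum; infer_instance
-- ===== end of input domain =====

-- B replaces A's greedy pivot-and-swap construction by an exhaustive search: it enumerates every
-- single swap of two of the first n elements and returns the largest joined string that is smaller
-- than the original (objective: alternative algorithm, same result, higher cost).
-- A swaps two elements of the argument list in place and B does not; the theorems below are about
-- the RETURN value only.

-- ===== PORT A =====
-- shared Python primitives (exact inside Pre_; each default branch is a Python raise path excluded by Pre_)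
-- s[i] (negative index from the end); default "" = IndexError path
def pvAt (s : List String) (i : Int) : String := PySem.List.pyGetD s i ""
-- int(x); default 0 = ValueError path
def pvInt (x : String) : Int := (PySem.Int.ofStr? x).getD 0
-- ord(x); default 0 = TypeError path (len(x) ≠ 1)
def pvOrd (x : String) : Int := match x.toList with | [c] => (c.toNat : Int) | _ => 0
-- the same two Python lines occur in A and in B's inner loop: swap positions i and j, then "".join:
-- (t[i], t[j]) = (t[j], t[i]); "".join(t)
def prevNumSwapJoin (s : List String) (i j : Int) : String :=
  PySem.Str.join "" (PySem.List.pySetD (PySem.List.pySetD s i (pvAt s j)) j (pvAt s i))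

-- A's first loop: backward scan, break at the first descent
def prevNumPivot (s : List String) : List Int → Int
  | [] => -1
  | i :: rest => if pvInt (pvAt s i) > pvInt (pvAt s (i + 1)) then i else prevNumPivot s rest

-- A's second loop: backward scan with the fused running-max update
def prevNumTmp (s : List String) (vt : Int) : List Int → Int → Int
  | [], tmp => tmp
  | i :: rest, tmp =>
    if tmp = -1 ∧ pvOrd (pvAt s i) < pvOrd (pvAt s vt) then prevNumTmp s vt rest i
    else if vt > -1 ∧ pvOrd (pvAt s i) ≥ pvOrd (pvAt s tmp) ∧ pvOrd (pvAt s i) < pvOrd (pvAt s vt) then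
      prevNumTmp s vt rest i
    else prevNumTmp s vt rest tmp

def prevNum (s : List String) (n : Int) : String :=
  let vt := prevNumPivot s (PySem.List.pyRange (n - 2) (-1) (-1))
  let tmp := prevNumTmp s vt (PySem.List.pyRange (n - 1) vt (-1)) (-1)
  if vt = -1 then "-1"   -- "".join("-1") = "-1"
  else prevNumSwapJoin s vt tmp

-- ===== PORT B =====
-- B's nested loops: collect the join of every single swap (i, j), i < j < n, that is < the original
def prevNum_alt (s : List String) (n : Int) : String :=
  let orig := PySem.Str.join "" s
  let cands :=
    (PySem.List.pyRange 0 n 1).foldl (fun acc i =>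
      (PySem.List.pyRange (i + 1) n 1).foldl (fun acc j =>
        if prevNumSwapJoin s i j < orig then acc ++ [prevNumSwapJoin s i j] else acc) acc) []
  match PySem.List.max? cands (fun c => c) with   -- `if not cands: return "-1"; return max(cands)`
  | none => "-1"
  | some m => m

-- ===== PRECONDITION & SPEC =====
-- a single decimal-digit string '0'..'9'
def pvDigit (x : String) : Bool := match x.toList with | [c] => 48 ≤ c.toNat && c.toNat ≤ 57 | _ => false

-- Pre_ excludes n > len(s) (both programs raise IndexError) and, for n ≥ 1, inputs with a non-digit
-- or multi-character entry: int()/ord() makes A raise on nearly all of those, and on the few where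
-- A's broken-off first loop never parses the junk entry and A still returns, B's string-comparison
-- search can return a differently ordered result (multi-character entries shift the join).
def Pre_prevNum (s : List String) (n : Int) : Prop :=
  n ≤ 0 ∨ (n ≤ (s.length : Int) ∧ ∀ x ∈ s, pvDigit x = true)
instance (s : List String) (n : Int) : Decidable (Pre_prevNum s n) := by
  unfold Pre_prevNum; infer_instance

def pvWitness_prevNum : List String × Int := (["2", "1"], 2)

def Spec_prevNum (s : List String) (n : Int) (out : String) : Prop := out = prevNum_alt s n
instance (s : List String) (n : Int) (out : String) : Decidable (Spec_prevNum s n out) := by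
  unfold Spec_prevNum; infer_instance

-- ===== CLAIM (what is proved, stated in full; the proofs are below) =====
def Claim_equal_prevNum : Prop :=
  ∀ (s : List String) (n : Int), Dom_prevNum s n → Pre_prevNum s n → Spec_prevNum s n (prevNum s n)

-- ===== LEMMAS AND PROOFS =====

-- ---- digit / single-character string facts ----

theorem pvDigitVal (c : Char) (h1 : 48 ≤ c.toNat) (h2 : c.toNat ≤ 57) :
    PySem.Int.ofChars? [c] = some ((c.toNat : Int) - 48) := by
  interval_cases h : c.toNat <;>
    (rw [show c = Char.ofNat _ from ((h ▸ Char.ofNat_toNat c).symm)]; decide)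

theorem pv_int_eq_ord (x : String) (hx : pvDigit x = true) : pvInt x = pvOrd x - 48 := by
  unfold pvDigit at hx
  unfold pvInt pvOrd PySem.Int.ofStr?
  rcases hl : x.toList with _ | ⟨c, _ | ⟨d, t⟩⟩ <;> rw [hl] at hx <;> simp at hx
  rw [pvDigitVal c hx.1 hx.2]
  simp

-- Char order through toNat
theorem pv_char_lt (a b : Char) : a < b ↔ a.toNat < b.toNat := by
  rw [show (a < b) = (a.val < b.val) from rfl, UInt32.lt_iff_toNat_lt]; rfl

theorem pv_char_eq (a b : Char) (h : a.toNat = b.toNat) : a = b := by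
  rcases lt_trichotomy a b with h1 | h1 | h1
  · rw [pv_char_lt] at h1; omega
  · exact h1
  · rw [pv_char_lt] at h1; omega

-- single-character strings compare like their pvOrd
theorem pv_lt_iff_ord (x y : String) (cx cy : Char)
    (hx : x.toList = [cx]) (hy : y.toList = [cy]) : x < y ↔ pvOrd x < pvOrd y := by
  rw [String.lt_iff_toList_lt, hx, hy, List.cons_lt_cons_iff]
  simp only [pvOrd, hx, hy]
  constructor
  · rintro (h | ⟨-, h⟩)
    · exact_mod_cast (pv_char_lt cx cy).mp h
    · exact absurd h (lt_irrefl _)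
  · intro h
    exact Or.inl ((pv_char_lt cx cy).mpr (by exact_mod_cast h))

theorem pv_eq_of_ord (x y : String) (cx cy : Char)
    (hx : x.toList = [cx]) (hy : y.toList = [cy]) (h : pvOrd x = pvOrd y) : x = y := by
  simp only [pvOrd, hx, hy] at h
  have hc : cx = cy := pv_char_eq cx cy (by exact_mod_cast h)
  rw [← String.toList_inj, hx, hy, hc]

-- a digit string has exactly one character
theorem pvDigit_one (x : String) (hx : pvDigit x = true) : ∃ c, x.toList = [c] := by
  unfold pvDigit at hx
  rcases hl : x.toList with _ | ⟨c, _ | ⟨d, t⟩⟩ <;> rw [hl] at hx <;> simp at hx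
  exact ⟨c, rfl⟩

-- ---- joins of single-character strings compare like the string lists themselves ----

theorem pv_chars_join_nil (l : List (List Char)) : PySem.Chars.join [] l = l.flatten := by
  induction l with
  | nil => simp [PySem.Chars.join_nil]
  | cons x t ih =>
    cases t with
    | nil => simp [PySem.Chars.join_singleton]
    | cons y r => rw [PySem.Chars.join_cons_cons, List.flatten_cons, ← ih]; simp

theorem pv_toList_join (u : List String) :
    (PySem.Str.join "" u).toList = (u.map String.toList).flatten := by
  rw [PySem.Str.toList_join, show ("" : String).toList = [] from rfl, pv_chars_join_nil]

theorem pv_join_lt_iff (u v : List String)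
    (hu : ∀ x ∈ u, ∃ c, x.toList = [c]) (hv : ∀ x ∈ v, ∃ c, x.toList = [c]) :
    PySem.Str.join "" u < PySem.Str.join "" v ↔ u < v := by
  rw [String.lt_iff_toList_lt, pv_toList_join, pv_toList_join]
  induction u generalizing v with
  | nil =>
    cases v with
    | nil => simp [lt_irrefl]
    | cons y t =>
      obtain ⟨cy, hcy⟩ := hv y (by simp)
      simp only [List.map_nil, List.flatten_nil, List.map_cons, List.flatten_cons, hcy,
        List.cons_append]
      constructor <;> intro _ <;> exact List.nil_lt_cons _ _
  | cons x u' ih =>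
    obtain ⟨cx, hcx⟩ := hu x (by simp)
    cases v with
    | nil =>
      simp only [List.map_cons, List.flatten_cons, hcx, List.cons_append, List.map_nil,
        List.flatten_nil]
      constructor <;> intro h
      · exact absurd h (List.not_lt_nil _)
      · exact absurd h (List.not_lt_nil _)
    | cons y v' =>
      obtain ⟨cy, hcy⟩ := hv y (by simp)
      simp only [List.map_cons, List.flatten_cons, hcx, hcy, List.cons_append,
        List.nil_append, List.cons_lt_cons_iff]
      rw [ih v' (fun z hz => hu z (List.mem_cons_of_mem _ hz))
        (fun z hz => hv z (List.mem_cons_of_mem _ hz))]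
      constructor
      · rintro (h | ⟨he, h⟩)
        · exact Or.inl (by rw [String.lt_iff_toList_lt, hcx, hcy, List.cons_lt_cons_iff]
                           exact Or.inl h)
        · exact Or.inr ⟨by rw [← String.toList_inj, hcx, hcy, he], h⟩
      · rintro (h | ⟨he, h⟩)
        · rw [String.lt_iff_toList_lt, hcx, hcy, List.cons_lt_cons_iff] at h
          rcases h with h | ⟨-, h⟩
          · exact Or.inl h
          · exact absurd h (lt_irrefl _)
        · refine Or.inr ⟨?_, h⟩
          have := congrArg String.toList he
          rw [hcx, hcy] at this
          simpa using this

-- ---- lexicographic order on List String by first difference ----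

theorem pv_append_lt_iff (p u v : List String) : p ++ u < p ++ v ↔ u < v := by
  induction p with
  | nil => rfl
  | cons a t ih => rw [List.cons_append, List.cons_append, List.cons_lt_cons_iff]; simp [ih]

theorem pv_lt_of_take_eq (u v : List String) (k : Nat) (hku : k < u.length) (hkv : k < v.length)
    (ht : u.take k = v.take k) (h : u[k] < v[k]) : u < v := by
  have key : u.take k ++ u[k] :: u.drop (k + 1) < v.take k ++ v[k] :: v.drop (k + 1) := by
    rw [ht, pv_append_lt_iff, List.cons_lt_cons_iff]
    exact Or.inl h
  rwa [← List.drop_eq_getElem_cons hku, List.take_append_drop,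
       ← List.drop_eq_getElem_cons hkv, List.take_append_drop] at key

-- first-difference tool: equal below k, strictly smaller at k
theorem pv_lt_of_ptwise (u v : List String) (k : Nat) (hku : k < u.length) (hkv : k < v.length)
    (hpre : ∀ m, m < k → ∀ (h1 : m < u.length) (h2 : m < v.length), u[m] = v[m])
    (h : u[k] < v[k]) : u < v := by
  apply pv_lt_of_take_eq u v k hku hkv _ h
  apply List.ext_getElem
  · rw [List.length_take, List.length_take]; omega
  · intro m hm1 hm2
    rw [List.length_take] at hm1
    simp only [List.getElem_take]
    exact hpre m (by omega) (by omega) (by omega)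

theorem pv_eq_of_ptwise (u v : List String) (hlen : u.length = v.length)
    (hpt : ∀ m (h1 : m < u.length) (h2 : m < v.length), u[m] = v[m]) : u = v :=
  List.ext_getElem hlen hpt

-- ---- the swap as a list operation ----

def pvSwap (s : List String) (i j : Nat) : List String :=
  (s.set i (s.getD j "")).set j (s.getD i "")

theorem pv_length_swap (s : List String) (i j : Nat) : (pvSwap s i j).length = s.length := by
  simp [pvSwap]

theorem pv_getElem_swap (s : List String) (i j m : Nat) (hi : i < s.length) (hj : j < s.length)
    (hm : m < (pvSwap s i j).length) :
    (pvSwap s i j)[m] = if m = j then s[i] else if m = i then s[j] else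
      s[m]'(by simpa [pv_length_swap] using hm) := by
  simp only [pvSwap, List.getElem_set, List.getD_eq_getElem s "" hi, List.getD_eq_getElem s "" hj]
  rcases eq_or_ne m j with rfl | h1
  · simp
  · rcases eq_or_ne m i with rfl | h2
    · simp [h1, Ne.symm h1]
    · simp [h1, h2, Ne.symm h1, Ne.symm h2]

theorem pv_mem_swap (s : List String) (i j : Nat) (hi : i < s.length) (hj : j < s.length) :
    ∀ x ∈ pvSwap s i j, x ∈ s := by
  intro x hx
  unfold pvSwap at hx
  rcases List.mem_or_eq_of_mem_set hx with hx | rfl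
  · rcases List.mem_or_eq_of_mem_set hx with hx | rfl
    · exact hx
    · rw [List.getD_eq_getElem s "" hj]; exact List.getElem_mem _
  · rw [List.getD_eq_getElem s "" hi]; exact List.getElem_mem _

-- prevNumSwapJoin at in-range indices is the join of the swapped list
theorem pv_swapJoin_eq (s : List String) (i j : Int) (hi : 0 ≤ i ∧ i < (s.length : Int))
    (hj : 0 ≤ j ∧ j < (s.length : Int)) :
    prevNumSwapJoin s i j = PySem.Str.join "" (pvSwap s i.toNat j.toNat) := by
  unfold prevNumSwapJoin pvSwap pvAt
  have e1 : PySem.List.pyGetD s i "" = s.getD i.toNat "" := by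
    conv_lhs => rw [show i = ((i.toNat : Nat) : Int) by omega]
    rw [PySem.List.pyGetD_natCast]
  have e2 : PySem.List.pyGetD s j "" = s.getD j.toNat "" := by
    conv_lhs => rw [show j = ((j.toNat : Nat) : Int) by omega]
    rw [PySem.List.pyGetD_natCast]
  rw [e1, e2, PySem.List.pySetD_of_nonneg _ _ hi.1]
  have e3 : PySem.List.pySetD (s.set i.toNat (s.getD j.toNat "")) j ((s.getD i.toNat "")) =
      (s.set i.toNat (s.getD j.toNat "")).set j.toNat (s.getD i.toNat "") :=
    PySem.List.pySetD_of_nonneg _ _ hj.1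
  rw [e3]

-- ---- A's first loop: first descent from the right ----

theorem pv_pivot_spec (s : List String) (l : List Int)
    (hp : l.Pairwise (· < ·)) (h0 : ∀ i ∈ l, 0 ≤ i) :
    (prevNumPivot s l.reverse = -1 ∧
      ∀ i ∈ l, ¬ pvInt (pvAt s i) > pvInt (pvAt s (i + 1))) ∨
    (prevNumPivot s l.reverse ∈ l ∧
      pvInt (pvAt s (prevNumPivot s l.reverse)) > pvInt (pvAt s (prevNumPivot s l.reverse + 1)) ∧
      ∀ i ∈ l, prevNumPivot s l.reverse < i → ¬ pvInt (pvAt s i) > pvInt (pvAt s (i + 1))) := by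
  induction l using List.reverseRecOn with
  | nil => left; exact ⟨rfl, by simp⟩
  | append_singleton l' i ih =>
    have hpl : l'.Pairwise (· < ·) := (List.pairwise_append.mp hp).1
    have hlast : ∀ k ∈ l', k < i := fun k hk =>
      (List.pairwise_append.mp hp).2.2 k hk i (by simp)
    have h0' : ∀ k ∈ l', 0 ≤ k := fun k hk => h0 k (by simp [hk])
    have h0i : 0 ≤ i := h0 i (by simp)
    rw [List.reverse_append, List.reverse_singleton, List.singleton_append]
    simp only [prevNumPivot]
    by_cases hdesc : pvInt (pvAt s i) > pvInt (pvAt s (i + 1))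
    · right
      rw [if_pos hdesc]
      refine ⟨by simp, hdesc, ?_⟩
      intro k hk hik
      rcases List.mem_append.mp hk with hk | hk
      · exact absurd (hlast k hk) (by omega)
      · simp at hk; omega
    · rw [if_neg hdesc]
      rcases ih hpl h0' with ⟨hv, hno⟩ | ⟨hmem, hd2, hno⟩
      · left
        refine ⟨hv, ?_⟩
        intro k hk
        rcases List.mem_append.mp hk with hk | hk
        · exact hno k hk
        · simp at hk; subst hk; exact hdesc
      · right
        refine ⟨List.mem_append.mpr (Or.inl hmem), hd2, ?_⟩
        intro k hk hgt
        rcases List.mem_append.mp hk with hk | hk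
        · exact hno k hk hgt
        · simp at hk; subst hk; exact hdesc

-- ---- monotone-from-adjacent, on Int indices ----

theorem pv_mono (f : Int → String) (a b : Int)
    (hstep : ∀ k, a ≤ k → k + 1 ≤ b → f k ≤ f (k + 1)) :
    ∀ i j, a ≤ i → i ≤ j → j ≤ b → f i ≤ f j := by
  have key : ∀ m : Nat, ∀ i, a ≤ i → i + m ≤ b → f i ≤ f (i + m) := by
    intro m
    induction m with
    | zero => intro i _ _; simp
    | succ t ih =>
      intro i hai hib
      have h1 : f i ≤ f (i + t) := ih i hai (by push_cast at hib ⊢; omega)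
      have h2 : f (i + t) ≤ f (i + t + 1) :=
        hstep (i + t) (by omega) (by push_cast at hib; omega)
      have he : i + ((t + 1 : Nat) : Int) = i + t + 1 := by push_cast; ring
      rw [he]
      exact le_trans h1 h2
  intro i j h1 h2 h3
  have := key (j - i).toNat i h1 (by omega)
  rwa [show i + (((j - i).toNat : Nat) : Int) = j by omega] at this

-- ---- A's second loop (unchanged from the pivot-free characterisation) ----

theorem pv_tmp_append (s : List String) (vt : Int) (l1 l2 : List Int) (tmp : Int) :
    prevNumTmp s vt (l1 ++ l2) tmp = prevNumTmp s vt l2 (prevNumTmp s vt l1 tmp) := by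
  induction l1 generalizing tmp with
  | nil => rfl
  | cons i r ih =>
    simp only [List.cons_append, prevNumTmp]
    split_ifs <;> apply ih

theorem pv_tmp_step (s : List String) (vt i tmp : Int) (rest : List Int) (hvt : vt > -1) :
    prevNumTmp s vt (i :: rest) tmp =
      prevNumTmp s vt rest
        (if pvOrd (pvAt s i) < pvOrd (pvAt s vt) ∧
            (tmp = -1 ∨ pvOrd (pvAt s tmp) ≤ pvOrd (pvAt s i)) then i else tmp) := by
  simp only [prevNumTmp]
  split_ifs <;> first | rfl | omega

-- the value of A's second loop, written as head-first structural recursion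
def pvBest (s : List String) (vt : Int) : List Int → Int
  | [] => -1
  | j :: t =>
    let r := pvBest s vt t
    if pvOrd (pvAt s j) < pvOrd (pvAt s vt) ∧
        (r = -1 ∨ pvOrd (pvAt s r) ≤ pvOrd (pvAt s j)) then j else r

theorem pv_tmp_eq_pvBest (s : List String) (vt : Int) (hvt : vt > -1) (l : List Int) :
    prevNumTmp s vt l.reverse (-1) = pvBest s vt l := by
  induction l with
  | nil => rfl
  | cons j t ih =>
    simp only [List.reverse_cons]
    rw [pv_tmp_append, ih, pvBest]
    rw [pv_tmp_step s vt j (pvBest s vt t) [] hvt]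
    rfl

-- pvBest on a strictly increasing list of nonnegative indices:
-- either no candidate, or the leftmost index of maximal pvOrd among candidates
theorem pvBest_spec (s : List String) (vt : Int) (l : List Int)
    (hp : l.Pairwise (· < ·)) (h0 : ∀ j ∈ l, 0 ≤ j) :
    (pvBest s vt l = -1 ∧ ∀ k ∈ l, ¬ pvOrd (pvAt s k) < pvOrd (pvAt s vt)) ∨
    (pvBest s vt l ∈ l ∧ pvOrd (pvAt s (pvBest s vt l)) < pvOrd (pvAt s vt) ∧
      (∀ k ∈ l, pvOrd (pvAt s k) < pvOrd (pvAt s vt) →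
        pvOrd (pvAt s k) ≤ pvOrd (pvAt s (pvBest s vt l))) ∧
      (∀ k ∈ l, pvOrd (pvAt s k) = pvOrd (pvAt s (pvBest s vt l)) → pvBest s vt l ≤ k)) := by
  induction l with
  | nil => left; simp [pvBest]
  | cons j t ih =>
    have hjt : ∀ k ∈ t, j < k := fun k hk => (List.pairwise_cons.mp hp).1 k hk
    rcases ih (List.pairwise_cons.mp hp).2 (fun k hk => h0 k (by simp [hk])) with
      ⟨hb, hno⟩ | ⟨hmem, hlt, hmax, hmin⟩
    · simp only [pvBest, hb]
      split_ifs with hif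
      · right
        refine ⟨by simp, hif.1, ?_, ?_⟩
        · intro k hk hklt
          rcases List.mem_cons.mp hk with rfl | hk
          · exact le_refl _
          · exact absurd hklt (hno k hk)
        · intro k hk _
          rcases List.mem_cons.mp hk with rfl | hk
          · exact le_refl _
          · exact le_of_lt (hjt k hk)
      · left
        have hc : ¬ pvOrd (pvAt s j) < pvOrd (pvAt s vt) := fun h => hif ⟨h, Or.inl trivial⟩
        refine ⟨rfl, ?_⟩
        intro k hk
        rcases List.mem_cons.mp hk with rfl | hk
        · exact hc
        · exact hno k hk
    · have hr0 : 0 ≤ pvBest s vt t := h0 _ (by simp [hmem])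
      simp only [pvBest]
      by_cases hc : pvOrd (pvAt s j) < pvOrd (pvAt s vt) ∧
          (pvBest s vt t = -1 ∨ pvOrd (pvAt s (pvBest s vt t)) ≤ pvOrd (pvAt s j))
      · right
        have hge : pvOrd (pvAt s (pvBest s vt t)) ≤ pvOrd (pvAt s j) := by
          rcases hc.2 with h | h
          · omega
          · exact h
        simp only [if_pos hc]
        refine ⟨by simp, hc.1, ?_, ?_⟩
        · intro k hk hklt
          rcases List.mem_cons.mp hk with rfl | hk
          · exact le_refl _
          · exact le_trans (hmax k hk hklt) hge
        · intro k hk _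
          rcases List.mem_cons.mp hk with rfl | hk
          · exact le_refl _
          · exact le_of_lt (hjt k hk)
      · right
        simp only [if_neg hc]
        refine ⟨by simp [hmem], hlt, ?_, ?_⟩
        · intro k hk hklt
          rcases List.mem_cons.mp hk with rfl | hk
          · by_cases hj : pvOrd (pvAt s k) < pvOrd (pvAt s vt)
            · have : ¬ (pvBest s vt t = -1 ∨ pvOrd (pvAt s (pvBest s vt t)) ≤ pvOrd (pvAt s k)) := by
                tauto
              omega
            · exact absurd hklt hj
          · exact hmax k hk hklt
        · intro k hk hkeq
          rcases List.mem_cons.mp hk with rfl | hk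
          · exfalso
            apply hc
            exact ⟨by rw [hkeq]; exact hlt, Or.inr (le_of_eq hkeq.symm)⟩
          · exact hmin k hk hkeq

-- membership of an in-range element of s, and its digit fact
theorem pv_at_digit (s : List String) (n : Int) (hn : n ≤ (s.length : Int))
    (hd : ∀ x ∈ s, pvDigit x = true) (i : Int) (h0 : 0 ≤ i) (hi : i < n) :
    pvDigit (pvAt s i) = true := by
  apply hd
  apply PySem.List.pyGetD_mem
  constructor <;> omega

-- ---- B's candidate list in closed form ----

theorem pv_cands_eq (s : List String) (n : Int) (orig : String) :
    (PySem.List.pyRange 0 n 1).foldl (fun acc i =>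
        (PySem.List.pyRange (i + 1) n 1).foldl (fun acc j =>
          if prevNumSwapJoin s i j < orig then acc ++ [prevNumSwapJoin s i j] else acc) acc) [] =
      (PySem.List.pyRange 0 n 1).flatMap (fun i =>
        ((PySem.List.pyRange (i + 1) n 1).filter
            (fun j => decide (prevNumSwapJoin s i j < orig))).map (prevNumSwapJoin s i)) := by
  rw [show (fun (acc : List String) (i : Int) =>
        (PySem.List.pyRange (i + 1) n 1).foldl (fun acc j =>
          if prevNumSwapJoin s i j < orig then acc ++ [prevNumSwapJoin s i j] else acc) acc) =
      (fun acc i => acc ++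
        ((PySem.List.pyRange (i + 1) n 1).filter
            (fun j => decide (prevNumSwapJoin s i j < orig))).map (prevNumSwapJoin s i)) from
    funext fun acc => funext fun i =>
      PySem.List.foldl_append_ite (fun j => prevNumSwapJoin s i j < orig)
        (prevNumSwapJoin s i) _ acc]
  rw [PySem.List.foldl_append_eq_flatMap]
  rfl

-- pvAt at an in-range index, as a getElem
theorem pv_at_eq (s : List String) (i : Int) (h0 : 0 ≤ i) (hl : i < (s.length : Int)) :
    pvAt s i = s[i.toNat]'(by omega) := by
  unfold pvAt
  have e : PySem.List.pyGetD s i "" = s.getD i.toNat "" := by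
    conv_lhs => rw [show i = ((i.toNat : Nat) : Int) by omega]
    rw [PySem.List.pyGetD_natCast]
  rw [e, List.getD_eq_getElem s "" (by omega)]

-- ≤ bridge for single-character strings
theorem pv_le_iff_ord (x y : String) (cx cy : Char)
    (hx : x.toList = [cx]) (hy : y.toList = [cy]) : x ≤ y ↔ pvOrd x ≤ pvOrd y := by
  rw [← not_lt, pv_lt_iff_ord y x cy cx hy hx, not_lt]

-- ---- swap comparisons ----

theorem pv_swap_eq_self (s : List String) (i j : Nat) (hi : i < s.length) (hj : j < s.length)
    (h : s[i] = s[j]) : pvSwap s i j = s := by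
  apply pv_eq_of_ptwise _ _ (pv_length_swap s i j)
  intro m h1 h2
  rw [pv_getElem_swap s i j m hi hj h1]
  split_ifs with e1 e2
  · subst e1; exact h
  · subst e2; exact h.symm
  · rfl

theorem pv_swap_lt_orig (s : List String) (i j : Nat) (hij : i < j) (hj : j < s.length)
    (h : s[j] < s[i]'(lt_trans hij hj)) : pvSwap s i j < s := by
  have hi : i < s.length := lt_trans hij hj
  apply pv_lt_of_ptwise _ _ i (by rw [pv_length_swap]; omega) hi
  · intro m hm h1 h2
    rw [pv_getElem_swap s i j m hi hj h1]
    split_ifs with e1 e2 <;> first | omega | rfl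
  · rw [pv_getElem_swap s i j i hi hj (by rw [pv_length_swap]; omega)]
    split_ifs with e1 e2 <;> first | omega | exact h

theorem pv_orig_lt_swap (s : List String) (i j : Nat) (hij : i < j) (hj : j < s.length)
    (h : s[i]'(lt_trans hij hj) < s[j]) : s < pvSwap s i j := by
  have hi : i < s.length := lt_trans hij hj
  apply pv_lt_of_ptwise _ _ i hi (by rw [pv_length_swap]; omega)
  · intro m hm h1 h2
    rw [pv_getElem_swap s i j m hi hj h2]
    split_ifs with e1 e2 <;> first | omega | rfl
  · rw [pv_getElem_swap s i j i hi hj (by rw [pv_length_swap]; omega)]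
    split_ifs with e1 e2 <;> first | omega | exact h

-- the two ports with their local bindings expanded (definitional)
theorem pv_prevNum_eq (s : List String) (n : Int) :
    prevNum s n =
      if prevNumPivot s (PySem.List.pyRange (n - 2) (-1) (-1)) = -1 then "-1"
      else prevNumSwapJoin s (prevNumPivot s (PySem.List.pyRange (n - 2) (-1) (-1)))
        (prevNumTmp s (prevNumPivot s (PySem.List.pyRange (n - 2) (-1) (-1)))
          (PySem.List.pyRange (n - 1) (prevNumPivot s (PySem.List.pyRange (n - 2) (-1) (-1))) (-1))
          (-1)) := rfl

theorem pv_prevNum_alt_eq (s : List String) (n : Int) :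
    prevNum_alt s n =
      match PySem.List.max?
          ((PySem.List.pyRange 0 n 1).foldl (fun acc i =>
            (PySem.List.pyRange (i + 1) n 1).foldl (fun acc j =>
              if prevNumSwapJoin s i j < PySem.Str.join "" s then acc ++ [prevNumSwapJoin s i j]
              else acc) acc) []) (fun c => c) with
      | none => "-1"
      | some m => m := rfl

-- ===== VERDICT (by name: the statement is the Claim_ definition above) =====
theorem prevNum_spec : Claim_equal_prevNum := by
  intro s n _hdom hpre
  unfold Spec_prevNum
  rw [pv_prevNum_eq, pv_prevNum_alt_eq]
  by_cases hn0 : n ≤ 0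
  · rw [PySem.List.pyRange_neg_one_eq_nil (by omega : n - 2 ≤ -1),
        PySem.List.pyRange_one_eq_nil (by omega : n ≤ 0)]
    rfl
  · rcases hpre with h | ⟨hn, hd⟩
    · omega
    -- shared facts
    have honeE : ∀ (m : Nat) (hm : m < s.length), ∃ c, (s[m]).toList = [c] := fun m hm =>
      pvDigit_one _ (hd _ (List.getElem_mem _))
    have hAt : ∀ (i : Int) (h0 : 0 ≤ i) (h1 : i < n), pvAt s i = s[i.toNat]'(by omega) :=
      fun i h0 h1 => pv_at_eq s i h0 (by omega)
    have hOrdAt : ∀ i : Int, (h0 : 0 ≤ i) → (h1 : i < n) →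
        pvOrd (pvAt s i) = pvOrd (s[i.toNat]'(by omega)) := by
      intro i h0 h1; rw [hAt i h0 h1]
    have hltE : ∀ (a b : Nat) (ha : a < s.length) (hb : b < s.length),
        s[a] < s[b] ↔ pvOrd (s[a]) < pvOrd (s[b]) := by
      intro a b ha hb
      obtain ⟨ca, hca⟩ := honeE a ha
      obtain ⟨cb, hcb⟩ := honeE b hb
      exact pv_lt_iff_ord _ _ ca cb hca hcb
    have heqE : ∀ (a b : Nat) (ha : a < s.length) (hb : b < s.length),
        pvOrd (s[a]) = pvOrd (s[b]) → s[a] = s[b] := by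
      intro a b ha hb h
      obtain ⟨ca, hca⟩ := honeE a ha
      obtain ⟨cb, hcb⟩ := honeE b hb
      exact pv_eq_of_ord _ _ ca cb hca hcb h
    have hdig : ∀ i : Int, 0 ≤ i → i < n → pvDigit (pvAt s i) = true := fun i h0 h1 =>
      pv_at_digit s n hn hd i h0 h1
    have hdesc_ord : ∀ i : Int, 0 ≤ i → i + 1 < n →
        (pvInt (pvAt s i) > pvInt (pvAt s (i + 1)) ↔
          pvOrd (pvAt s (i + 1)) < pvOrd (pvAt s i)) := by
      intro i h0 h1
      rw [pv_int_eq_ord _ (hdig i h0 (by omega)), pv_int_eq_ord _ (hdig (i + 1) (by omega) h1)]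
      omega
    have honeSwap : ∀ (a b : Nat), a < s.length → b < s.length →
        ∀ x ∈ pvSwap s a b, ∃ c, x.toList = [c] := by
      intro a b ha hb x hx
      exact pvDigit_one x (hd x (pv_mem_swap s a b ha hb x hx))
    have honeS : ∀ x ∈ s, ∃ c, x.toList = [c] := fun x hx => pvDigit_one x (hd x hx)
    -- the pivot
    have hrev1 : PySem.List.pyRange (n - 2) (-1) (-1) =
        (PySem.List.pyRange 0 (n - 1) 1).reverse := by
      have e : n - 2 + 1 = n - 1 := by ring
      rw [PySem.List.pyRange_neg_one_eq_reverse, e]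
      norm_num
    have hpiv := pv_pivot_spec s (PySem.List.pyRange 0 (n - 1) 1)
      (PySem.List.pairwise_lt_pyRange_one 0 (n - 1))
      (fun i hi => (PySem.List.mem_pyRange_one.mp hi).1)
    rw [← hrev1] at hpiv
    set vt := prevNumPivot s (PySem.List.pyRange (n - 2) (-1) (-1)) with hvtdef
    rw [pv_cands_eq]
    rcases hpiv with ⟨hv1, hno⟩ | ⟨hmemv, hdescv, hnov⟩
    · -- no descent: s[0..n-1] is non-decreasing, no swap decreases, both sides "-1"
      have hmono : ∀ i j : Int, 0 ≤ i → i ≤ j → j ≤ n - 1 → pvAt s i ≤ pvAt s j := by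
        apply pv_mono
        intro k hk1 hk2
        have hnk := hno k (PySem.List.mem_pyRange_one.mpr ⟨hk1, by omega⟩)
        rw [hdesc_ord k hk1 (by omega)] at hnk
        obtain ⟨ck, hck⟩ := honeE k.toNat (by omega)
        obtain ⟨ck1, hck1⟩ := honeE (k + 1).toNat (by omega)
        rw [hAt k hk1 (by omega), hAt (k + 1) (by omega) (by omega)]
        rw [pv_le_iff_ord _ _ ck ck1 hck hck1]
        rw [hOrdAt k hk1 (by omega), hOrdAt (k + 1) (by omega) (by omega)] at hnk
        omega
      have hempty : (PySem.List.pyRange 0 n 1).flatMap (fun i =>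
          ((PySem.List.pyRange (i + 1) n 1).filter
              (fun j => decide (prevNumSwapJoin s i j < PySem.Str.join "" s))).map
            (prevNumSwapJoin s i)) = [] := by
        apply List.flatMap_eq_nil_iff.mpr
        intro i hi
        obtain ⟨hi0, hin⟩ := PySem.List.mem_pyRange_one.mp hi
        rw [List.map_eq_nil_iff, List.filter_eq_nil_iff]
        intro j hj
        obtain ⟨hj0, hjn⟩ := PySem.List.mem_pyRange_one.mp hj
        simp only [decide_eq_true_eq]
        intro hlt
        rw [pv_swapJoin_eq s i j ⟨hi0, by omega⟩ ⟨by omega, by omega⟩,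
            pv_join_lt_iff _ _ (honeSwap i.toNat j.toNat (by omega) (by omega)) honeS] at hlt
        have hle := hmono i j hi0 (by omega) (by omega)
        rw [hAt i hi0 (by omega), hAt j (by omega) (by omega)] at hle
        rcases eq_or_lt_of_le hle with he | hstrict
        · rw [pv_swap_eq_self s i.toNat j.toNat (by omega) (by omega) he] at hlt
          exact absurd hlt (lt_irrefl _)
        · exact absurd hlt
            (lt_asymm (pv_orig_lt_swap s i.toNat j.toNat (by omega) (by omega) hstrict))
      rw [hempty, hv1]
      rfl
    · -- descent at vt: A swaps (vt, best); B's maximum is the same string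
      obtain ⟨hvt0, hvtn⟩ := PySem.List.mem_pyRange_one.mp hmemv
      have hvtne : ¬ vt = -1 := by omega
      rw [if_neg hvtne]
      -- A's tmp is pvBest
      have hrev2 : PySem.List.pyRange (n - 1) vt (-1) =
          (PySem.List.pyRange (vt + 1) n 1).reverse := by
        have e : n - 1 + 1 = n := by ring
        rw [PySem.List.pyRange_neg_one_eq_reverse, e]
      rw [hrev2, pv_tmp_eq_pvBest s vt (by omega)]
      -- the best candidate
      have hcand1 : pvOrd (pvAt s (vt + 1)) < pvOrd (pvAt s vt) :=
        (hdesc_ord vt hvt0 (by omega)).mp hdescv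
      rcases pvBest_spec s vt (PySem.List.pyRange (vt + 1) n 1)
        (PySem.List.pairwise_lt_pyRange_one (vt + 1) n)
        (fun j hj => by have := (PySem.List.mem_pyRange_one.mp hj).1; omega) with
        ⟨-, hnone⟩ | ⟨hbmem, hblt, hbmax, hbmin⟩
      · exact absurd hcand1
          (hnone (vt + 1) (PySem.List.mem_pyRange_one.mpr ⟨le_refl _, by omega⟩))
      set b := pvBest s vt (PySem.List.pyRange (vt + 1) n 1) with hbdef
      obtain ⟨hb1, hbn⟩ := PySem.List.mem_pyRange_one.mp hbmem
      -- suffix monotone after the pivot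
      have hmono : ∀ i j : Int, vt + 1 ≤ i → i ≤ j → j ≤ n - 1 → pvAt s i ≤ pvAt s j := by
        apply pv_mono
        intro k hk1 hk2
        have hnk := hnov k (PySem.List.mem_pyRange_one.mpr ⟨by omega, by omega⟩) (by omega)
        rw [hdesc_ord k (by omega) (by omega)] at hnk
        obtain ⟨ck, hck⟩ := honeE k.toNat (by omega)
        obtain ⟨ck1, hck1⟩ := honeE (k + 1).toNat (by omega)
        rw [hAt k (by omega) (by omega), hAt (k + 1) (by omega) (by omega)]
        rw [pv_le_iff_ord _ _ ck ck1 hck hck1]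
        rw [hOrdAt k (by omega) (by omega), hOrdAt (k + 1) (by omega) (by omega)] at hnk
        omega
      -- ord facts at Nat indices
      have hbltN : pvOrd (s[b.toNat]'(by omega)) < pvOrd (s[vt.toNat]'(by omega)) := by
        rw [← hOrdAt b (by omega) (by omega), ← hOrdAt vt (by omega) (by omega)]
        exact hblt
      -- the winning string
      have hWlt : prevNumSwapJoin s vt b < PySem.Str.join "" s := by
        rw [pv_swapJoin_eq s vt b ⟨by omega, by omega⟩ ⟨by omega, by omega⟩,
            pv_join_lt_iff _ _ (honeSwap vt.toNat b.toNat (by omega) (by omega)) honeS]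
        exact pv_swap_lt_orig s vt.toNat b.toNat (by omega) (by omega)
          ((hltE b.toNat vt.toNat (by omega) (by omega)).mpr hbltN)
      have hWmem : prevNumSwapJoin s vt b ∈ (PySem.List.pyRange 0 n 1).flatMap (fun i =>
          ((PySem.List.pyRange (i + 1) n 1).filter
              (fun j => decide (prevNumSwapJoin s i j < PySem.Str.join "" s))).map
            (prevNumSwapJoin s i)) := by
        apply List.mem_flatMap.mpr
        refine ⟨vt, PySem.List.mem_pyRange_one.mpr ⟨hvt0, by omega⟩, ?_⟩
        apply List.mem_map.mpr
        exact ⟨b, List.mem_filter.mpr ⟨hbmem, by simpa using hWlt⟩, rfl⟩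
      -- every candidate is ≤ the winning string
      have hmax : ∀ c ∈ (PySem.List.pyRange 0 n 1).flatMap (fun i =>
          ((PySem.List.pyRange (i + 1) n 1).filter
              (fun j => decide (prevNumSwapJoin s i j < PySem.Str.join "" s))).map
            (prevNumSwapJoin s i)), c ≤ prevNumSwapJoin s vt b := by
        intro c hc
        obtain ⟨i, hi, hc2⟩ := List.mem_flatMap.mp hc
        obtain ⟨j, hj2, rfl⟩ := List.mem_map.mp hc2
        obtain ⟨hjmem, hjdec⟩ := List.mem_filter.mp hj2
        obtain ⟨hi0, hin⟩ := PySem.List.mem_pyRange_one.mp hi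
        obtain ⟨hj0, hjn⟩ := PySem.List.mem_pyRange_one.mp hjmem
        have hclt : prevNumSwapJoin s i j < PySem.Str.join "" s := by simpa using hjdec
        rw [pv_swapJoin_eq s i j ⟨hi0, by omega⟩ ⟨by omega, by omega⟩,
            pv_join_lt_iff _ _ (honeSwap i.toNat j.toNat (by omega) (by omega)) honeS] at hclt
        -- from c < orig: s[j] < s[i]
        have hji : s[j.toNat]'(by omega) < s[i.toNat]'(by omega) := by
          rcases lt_trichotomy (s[j.toNat]'(by omega)) (s[i.toNat]'(by omega)) with h | h | h
          · exact h
          · rw [pv_swap_eq_self s i.toNat j.toNat (by omega) (by omega) h.symm] at hclt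
            exact absurd hclt (lt_irrefl _)
          · exact absurd hclt
              (lt_asymm (pv_orig_lt_swap s i.toNat j.toNat (by omega) (by omega) h))
        -- goal at the list level
        rw [← not_lt,
            pv_swapJoin_eq s i j ⟨hi0, by omega⟩ ⟨by omega, by omega⟩,
            pv_swapJoin_eq s vt b ⟨by omega, by omega⟩ ⟨by omega, by omega⟩,
            pv_join_lt_iff _ _ (honeSwap vt.toNat b.toNat (by omega) (by omega))
              (honeSwap i.toNat j.toNat (by omega) (by omega))]
        -- it remains: ¬ pvSwap s vt b < pvSwap s i j
        rcases lt_trichotomy i vt with hivt | hivt | hivt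
        · -- i < vt: the candidate already lost at position i
          apply lt_asymm
          apply pv_lt_of_ptwise _ _ i.toNat (by rw [pv_length_swap]; omega)
            (by rw [pv_length_swap]; omega)
          · intro m hm h1 h2
            rw [pv_getElem_swap s i.toNat j.toNat m (by omega) (by omega) h1,
                pv_getElem_swap s vt.toNat b.toNat m (by omega) (by omega) h2]
            split_ifs <;> first | omega | rfl
          · rw [pv_getElem_swap s i.toNat j.toNat i.toNat (by omega) (by omega)
                  (by rw [pv_length_swap]; omega),
                pv_getElem_swap s vt.toNat b.toNat i.toNat (by omega) (by omega)
                  (by rw [pv_length_swap]; omega)]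
            split_ifs <;> first | omega | exact hji
        · -- i = vt: j competes with b
          subst hivt
          have hjord : pvOrd (pvAt s j) < pvOrd (pvAt s vt) := by
            rw [hOrdAt j (by omega) (by omega), hOrdAt vt (by omega) (by omega)]
            rw [hltE j.toNat vt.toNat (by omega) (by omega)] at hji
            exact hji
          have hjb := hbmax j (PySem.List.mem_pyRange_one.mpr ⟨by omega, hjn⟩) hjord
          rcases eq_or_lt_of_le hjb with hjbeq | hjblt
          · -- equal digits: b is the leftmost, so b ≤ j
            have hbj := hbmin j (PySem.List.mem_pyRange_one.mpr ⟨by omega, hjn⟩) hjbeq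
            have hjbE : s[j.toNat]'(by omega) = s[b.toNat]'(by omega) := by
              apply heqE
              rw [← hOrdAt j (by omega) (by omega), ← hOrdAt b (by omega) (by omega)]
              exact hjbeq
            rcases eq_or_lt_of_le hbj with hbj2 | hbj2
            · -- same swap
              rw [← hbj2]
              exact lt_irrefl _
            · -- b < j: the candidate lost at position b
              apply lt_asymm
              apply pv_lt_of_ptwise _ _ b.toNat (by rw [pv_length_swap]; omega)
                (by rw [pv_length_swap]; omega)
              · intro m hm h1 h2
                rw [pv_getElem_swap s vt.toNat j.toNat m (by omega) (by omega) h1,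
                    pv_getElem_swap s vt.toNat b.toNat m (by omega) (by omega) h2]
                split_ifs <;> first | omega | rfl | exact hjbE
              · rw [pv_getElem_swap s vt.toNat j.toNat b.toNat (by omega) (by omega)
                      (by rw [pv_length_swap]; omega),
                    pv_getElem_swap s vt.toNat b.toNat b.toNat (by omega) (by omega)
                      (by rw [pv_length_swap]; omega)]
                split_ifs <;> first | omega |
                  exact (hltE b.toNat vt.toNat (by omega) (by omega)).mpr hbltN
          · -- strictly smaller digit: the candidate lost at position vt
            have hjbN : s[j.toNat]'(by omega) < s[b.toNat]'(by omega) := by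
              rw [hltE j.toNat b.toNat (by omega) (by omega),
                  ← hOrdAt j (by omega) (by omega), ← hOrdAt b (by omega) (by omega)]
              exact hjblt
            apply lt_asymm
            apply pv_lt_of_ptwise _ _ vt.toNat (by rw [pv_length_swap]; omega)
              (by rw [pv_length_swap]; omega)
            · intro m hm h1 h2
              rw [pv_getElem_swap s vt.toNat j.toNat m (by omega) (by omega) h1,
                  pv_getElem_swap s vt.toNat b.toNat m (by omega) (by omega) h2]
              split_ifs <;> first | omega | rfl
            · rw [pv_getElem_swap s vt.toNat j.toNat vt.toNat (by omega) (by omega)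
                    (by rw [pv_length_swap]; omega),
                  pv_getElem_swap s vt.toNat b.toNat vt.toNat (by omega) (by omega)
                    (by rw [pv_length_swap]; omega)]
              split_ifs <;> first | omega | exact hjbN
        · -- i > vt: impossible, the suffix is non-decreasing
          exfalso
          have hle := hmono i j (by omega) (by omega) (by omega)
          rw [hAt i (by omega) (by omega), hAt j (by omega) (by omega)] at hle
          exact absurd hji (not_lt.mpr hle)
      -- conclude: the maximum of the candidates is exactly A's swap
      cases hm : PySem.List.max? ((PySem.List.pyRange 0 n 1).flatMap (fun i =>
          ((PySem.List.pyRange (i + 1) n 1).filter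
              (fun j => decide (prevNumSwapJoin s i j < PySem.Str.join "" s))).map
            (prevNumSwapJoin s i))) (fun c => c) with
      | none =>
        rw [PySem.List.max?_eq_none_iff] at hm
        rw [hm] at hWmem
        exact absurd hWmem (List.not_mem_nil)
      | some m =>
        have h1 : prevNumSwapJoin s vt b ≤ m := PySem.List.max?_isMax hm _ hWmem
        have h2 : m ≤ prevNumSwapJoin s vt b := hmax m (PySem.List.max?_mem hm)
        exact (le_antisymm h2 h1).symm
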